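-- pv_equiv track=rewrite | github.com/vivienhenz24/15c-poster | data/QGuides-30Sept2025 (1)/QGuides-2/analyzer.py | get_latest_semester
-- ===== SOURCE A (Python) =====
-- def get_semester_order():
--     """Return the ordered list of semesters from oldest to newest."""
--     semesters = []
--     for year in range(2021, 2026):
--         semesters.append(f"{year}Spring")
--         semesters.append(f"{year}Fall")
--     return semesters
--
-- def get_latest_semester(available_semesters):
--     """Get the latest semester from a list of available semesters."""
--     semester_order = get_semester_order()
--
--     # Find the latest semester that exists in available_semesters
--     for semester in reversed(semester_order):
--         if semester in available_semesters:
--             return semester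
--
--     # If no match found in our ordered list, return the last one alphabetically
--     if available_semesters:
--         return sorted(available_semesters)[-1]
--     return None
-- ===== SOURCE B (Python) =====
-- def get_latest_semester(available_semesters):
--     """Get the latest semester from a list of available semesters."""
--     rank = {}
--     i = 0
--     for year in range(2021, 2026):
--         rank[f"{year}Spring"] = i
--         i += 1
--         rank[f"{year}Fall"] = i
--         i += 1
--     best = None
--     best_rank = -1
--     for s in available_semesters:
--         r = rank.get(s, -1)
--         if r > best_rank:
--             best = s
--             best_rank = r
--     if best is not None:
--         return best
--     if available_semesters:
--         return sorted(available_semesters)[-1]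
--     return None
-- ===== Notes on version B (the rewrite author's own statement) =====
-- stated objective: idiomatic
-- what changed: Instead of scanning the fixed semester list in reverse and testing membership in the data for each, B builds a rank dict once and makes a single pass over available_semesters keeping the element of highest rank; the alphabetical fallback and None case are unchanged.
import Mathlib
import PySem

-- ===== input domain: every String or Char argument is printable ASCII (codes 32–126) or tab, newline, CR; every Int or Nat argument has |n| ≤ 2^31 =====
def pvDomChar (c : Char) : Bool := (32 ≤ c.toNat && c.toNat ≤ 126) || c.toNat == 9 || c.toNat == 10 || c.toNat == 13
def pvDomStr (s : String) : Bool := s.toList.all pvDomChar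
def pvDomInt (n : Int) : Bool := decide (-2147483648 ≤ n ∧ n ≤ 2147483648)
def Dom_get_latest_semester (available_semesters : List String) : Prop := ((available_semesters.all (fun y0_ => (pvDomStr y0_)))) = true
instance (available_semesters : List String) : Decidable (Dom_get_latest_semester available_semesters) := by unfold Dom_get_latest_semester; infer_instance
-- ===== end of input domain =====

-- B replaces A's reverse scan of the fixed semester list (membership test per element) by one pass
-- over the input with a precomputed rank dict; same fallback; objective: idiomatic single pass.

-- ===== PORT A =====
-- get_semester_order(): builds the list oldest→newest (f"{year}Spring" / f"{year}Fall")
def get_semester_order : List String :=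
  (PySem.List.pyRange 2021 2026 1).foldl
    (fun acc year =>
      (acc ++ [PySem.Str.join "" [PySem.Int.toStr year, "Spring"]])
        ++ [PySem.Str.join "" [PySem.Int.toStr year, "Fall"]]) []

-- 'for semester in reversed(order): if semester in available: return semester'
def pvScanRev (available : List String) : List String → Option String
  | [] => none
  | o :: rest => if o ∈ available then some o else pvScanRev available rest

def get_latest_semester (available_semesters : List String) : Option String :=
  match pvScanRev available_semesters get_semester_order.reverse with
  | some s => some s
  | none =>
      if available_semesters ≠ [] then
        -- sorted(available)[-1]; the list is nonempty here so pyGet? is some, matching Python's return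
        PySem.List.pyGet? (PySem.List.sorted available_semesters (fun x => x) false) (-1)
      else none

-- ===== PORT B =====
-- rank dict built by the same range loop, with a running counter i
def pvRank : PySem.Dict String Int :=
  ((PySem.List.pyRange 2021 2026 1).foldl
    (fun (st : PySem.Dict String Int × Int) year =>
      let d := st.1.insert (PySem.Str.join "" [PySem.Int.toStr year, "Spring"]) st.2
      let i := st.2 + 1
      let d := d.insert (PySem.Str.join "" [PySem.Int.toStr year, "Fall"]) i
      (d, i + 1)) (PySem.Dict.empty, 0)).1

-- loop body: r = rank.get(s, -1); if r > best_rank: best, best_rank = s, r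
def pvStep (st : Option String × Int) (s : String) : Option String × Int :=
  let r := PySem.Dict.getD pvRank s (-1)
  if r > st.2 then (some s, r) else st

def get_latest_semester_alt (available_semesters : List String) : Option String :=
  let res := available_semesters.foldl pvStep (none, -1)
  match res.1 with
  | some s => some s
  | none =>
      if available_semesters ≠ [] then
        PySem.List.pyGet? (PySem.List.sorted available_semesters (fun x => x) false) (-1)
      else none

-- ===== PRECONDITION & SPEC =====
def Spec_get_latest_semester (available_semesters : List String) (out : Option String) : Prop := out = get_latest_semester_alt available_semesters
instance (available_semesters : List String) (out : Option String) : Decidable (Spec_get_latest_semester available_semesters out) := by unfold Spec_get_latest_semester; infer_instance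

-- ===== CLAIM (what is proved, stated in full; the proofs are below) =====
def Claim_equal_get_latest_semester : Prop := ∀ (available_semesters : List String), Dom_get_latest_semester available_semesters → Spec_get_latest_semester available_semesters (get_latest_semester available_semesters)

-- ===== LEMMAS AND PROOFS =====

def pvRk (s : String) : Int := PySem.Dict.getD pvRank s (-1)

-- the ten semesters with their ranks, oldest to newest (proof-side table)
def pvTable : List (String × Int) :=
  [("2021Spring",0),("2021Fall",1),("2022Spring",2),("2022Fall",3),("2023Spring",4),
   ("2023Fall",5),("2024Spring",6),("2024Fall",7),("2025Spring",8),("2025Fall",9)]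

lemma pvRank_eq : pvRank = PySem.Dict.mk pvTable := by decide

lemma pvRk_cases (s : String) : pvRk s = -1 ∨ (s, pvRk s) ∈ pvTable := by
  by_cases h0 : s = "2021Spring"; · right; subst h0; decide
  by_cases h1 : s = "2021Fall"; · right; subst h1; decide
  by_cases h2 : s = "2022Spring"; · right; subst h2; decide
  by_cases h3 : s = "2022Fall"; · right; subst h3; decide
  by_cases h4 : s = "2023Spring"; · right; subst h4; decide
  by_cases h5 : s = "2023Fall"; · right; subst h5; decide
  by_cases h6 : s = "2024Spring"; · right; subst h6; decide
  by_cases h7 : s = "2024Fall"; · right; subst h7; decide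
  by_cases h8 : s = "2025Spring"; · right; subst h8; decide
  by_cases h9 : s = "2025Fall"; · right; subst h9; decide
  left
  simp [pvRk, pvRank_eq, pvTable, PySem.Dict.getD, beq_iff_eq,
    Ne.symm h0, Ne.symm h1, Ne.symm h2, Ne.symm h3, Ne.symm h4, Ne.symm h5, Ne.symm h6,
    Ne.symm h7, Ne.symm h8, Ne.symm h9, PySem.Dict.get?]

lemma pv_fold_snd_ge_init (xs : List String) (st : Option String × Int) :
    st.2 ≤ (xs.foldl pvStep st).2 := by
  induction xs generalizing st with
  | nil => exact le_refl _
  | cons a t ih =>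
    refine le_trans ?_ (ih (pvStep st a))
    simp only [pvStep]
    split <;> omega

lemma pv_fold_snd_ge_mem (xs : List String) (st : Option String × Int) (s : String)
    (hs : s ∈ xs) : pvRk s ≤ (xs.foldl pvStep st).2 := by
  induction xs generalizing st with
  | nil => cases hs
  | cons a t ih =>
    rcases List.mem_cons.mp hs with rfl | hs'
    · refine le_trans ?_ (pv_fold_snd_ge_init t (pvStep st s))
      simp only [pvStep, pvRk]
      split <;> omega
    · exact ih (pvStep st a) hs'

lemma pv_fold_result (xs : List String) (st : Option String × Int) :
    xs.foldl pvStep st = st ∨ ∃ s ∈ xs, xs.foldl pvStep st = (some s, pvRk s) := by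
  induction xs generalizing st with
  | nil => exact Or.inl rfl
  | cons a t ih =>
    by_cases h : PySem.Dict.getD pvRank a (-1) > st.2
    · have hstep : pvStep st a = (some a, pvRk a) := by simp [pvStep, pvRk, h]
      rcases ih (pvStep st a) with heq | ⟨s, hsmem, heq⟩
      · right
        refine ⟨a, List.mem_cons_self, ?_⟩
        rw [List.foldl_cons, hstep]
        rw [hstep] at heq
        exact heq
      · right
        exact ⟨s, List.mem_cons_of_mem _ hsmem, by rw [List.foldl_cons]; exact heq⟩
    · have hstep : pvStep st a = st := by simp [pvStep, h]
      rcases ih st with heq | ⟨s, hsmem, heq⟩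
      · left; rw [List.foldl_cons, hstep]; exact heq
      · right
        exact ⟨s, List.mem_cons_of_mem _ hsmem, by rw [List.foldl_cons, hstep]; exact heq⟩

lemma pv_tab_rk : ∀ p ∈ pvTable, pvRk p.1 = p.2 := by decide

lemma pv_tab_inj : ∀ p ∈ pvTable, ∀ q ∈ pvTable, p.2 = q.2 → p.1 = q.1 := by decide

lemma pv_tab_nonneg : ∀ p ∈ pvTable, 0 ≤ p.2 := by decide

-- main branch lemma: sk ∈ xs has rank k and nothing ranked above k is in xs
lemma pv_case (xs : List String) (k : Int) (sk : String)
    (htab : (sk, k) ∈ pvTable) (hmem : sk ∈ xs)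
    (habs : ∀ p ∈ pvTable, k < p.2 → p.1 ∉ xs) :
    xs.foldl pvStep (none, -1) = (some sk, k) := by
  have hk : (0 : Int) ≤ k := pv_tab_nonneg _ htab
  have hrk : pvRk sk = k := pv_tab_rk _ htab
  have habs' : ∀ s ∈ xs, pvRk s ≤ k := by
    intro s hs
    rcases pvRk_cases s with h | h
    · omega
    · by_contra hgt
      exact habs _ h (by omega) hs
  have hge : k ≤ (xs.foldl pvStep (none, -1)).2 := hrk ▸ pv_fold_snd_ge_mem xs _ sk hmem
  rcases pv_fold_result xs (none, -1) with heq | ⟨s, hsmem, heq⟩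
  · rw [heq] at hge; simp at hge; omega
  · have h2 : k ≤ pvRk s := by rw [heq] at hge; exact hge
    have hrks : pvRk s = k := le_antisymm (habs' s hsmem) h2
    rcases pvRk_cases s with h | h
    · omega
    · have : s = sk := pv_tab_inj _ h _ htab (by rw [hrks])
      subst this
      rw [heq, hrks]

lemma pv_fold_none (xs : List String) (habs : ∀ s ∈ xs, pvRk s = -1) :
    xs.foldl pvStep (none, -1) = ((none : Option String), (-1 : Int)) := by
  induction xs with
  | nil => rfl
  | cons a t ih =>
    have ha : pvStep ((none : Option String), (-1 : Int)) a = (none, -1) := by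
      simp [pvStep, show PySem.Dict.getD pvRank a (-1) = -1 from habs a List.mem_cons_self]
    rw [List.foldl_cons, ha]
    exact ih (fun s hs => habs s (List.mem_cons_of_mem _ hs))

lemma pv_order_rev : get_semester_order.reverse =
    ["2025Fall","2025Spring","2024Fall","2024Spring","2023Fall","2023Spring",
     "2022Fall","2022Spring","2021Fall","2021Spring"] := by decide

-- ===== VERDICT (by name: the statement is the Claim_ definition above) =====
theorem get_latest_semester_spec : Claim_equal_get_latest_semester := by
  intro xs _
  unfold Spec_get_latest_semester get_latest_semester get_latest_semester_alt
  rw [pv_order_rev]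
  simp only [pvScanRev]
  by_cases m9 : "2025Fall" ∈ xs
  · have hb := pv_case xs 9 "2025Fall" (by decide) m9 (by intro p hp hlt; fin_cases hp <;> simp_all)
    simp [m9, hb]
  by_cases m8 : "2025Spring" ∈ xs
  · have hb := pv_case xs 8 "2025Spring" (by decide) m8 (by intro p hp hlt; fin_cases hp <;> simp_all)
    simp [m9, m8, hb]
  by_cases m7 : "2024Fall" ∈ xs
  · have hb := pv_case xs 7 "2024Fall" (by decide) m7 (by intro p hp hlt; fin_cases hp <;> simp_all)
    simp [m9, m8, m7, hb]
  by_cases m6 : "2024Spring" ∈ xs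
  · have hb := pv_case xs 6 "2024Spring" (by decide) m6 (by intro p hp hlt; fin_cases hp <;> simp_all)
    simp [m9, m8, m7, m6, hb]
  by_cases m5 : "2023Fall" ∈ xs
  · have hb := pv_case xs 5 "2023Fall" (by decide) m5 (by intro p hp hlt; fin_cases hp <;> simp_all)
    simp [m9, m8, m7, m6, m5, hb]
  by_cases m4 : "2023Spring" ∈ xs
  · have hb := pv_case xs 4 "2023Spring" (by decide) m4 (by intro p hp hlt; fin_cases hp <;> simp_all)
    simp [m9, m8, m7, m6, m5, m4, hb]
  by_cases m3 : "2022Fall" ∈ xs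
  · have hb := pv_case xs 3 "2022Fall" (by decide) m3 (by intro p hp hlt; fin_cases hp <;> simp_all)
    simp [m9, m8, m7, m6, m5, m4, m3, hb]
  by_cases m2 : "2022Spring" ∈ xs
  · have hb := pv_case xs 2 "2022Spring" (by decide) m2 (by intro p hp hlt; fin_cases hp <;> simp_all)
    simp [m9, m8, m7, m6, m5, m4, m3, m2, hb]
  by_cases m1 : "2021Fall" ∈ xs
  · have hb := pv_case xs 1 "2021Fall" (by decide) m1 (by intro p hp hlt; fin_cases hp <;> simp_all)
    simp [m9, m8, m7, m6, m5, m4, m3, m2, m1, hb]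
  by_cases m0 : "2021Spring" ∈ xs
  · have hb := pv_case xs 0 "2021Spring" (by decide) m0 (by intro p hp hlt; fin_cases hp <;> simp_all)
    simp [m9, m8, m7, m6, m5, m4, m3, m2, m1, m0, hb]
  · have hnone : xs.foldl pvStep (none, -1) = ((none : Option String), (-1 : Int)) := by
      refine pv_fold_none xs ?_
      intro s hs
      rcases pvRk_cases s with h | h
      · exact h
      · exfalso; fin_cases h <;> simp_all
    simp [m9, m8, m7, m6, m5, m4, m3, m2, m1, m0, hnone]
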